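-- pv_equiv track=rewrite | github.com/lvrcek/GNNome-assembly | utils.py | get_walks
-- ===== SOURCE A (Python) =====
-- def get_walks(start, neighbors, num_nodes):
--     """Return all the possible walks from a current node of length
--     num_nodes.
--
--     Parameters
--     ----------
--     start : int
--         Index of the starting node
--     neighbors : dict
--         Dictionary with the list of neighbors for each node
--     num_nodes : int
--         Length of the walks to be returned
--
--     Returns
--     -------
--     list
--         a list of all the possible walks, where each walk is also
--         stored in a list with num_nodes consecutive nodes
--     """
--     if num_nodes == 0:
--         return [[start]]
--     paths = []
--     for neighbor in neighbors[start]: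
--         next_paths = get_walks(neighbor, neighbors, num_nodes-1)
--         for path in next_paths:
--             path.append(start)
--             paths.append(path)
--     return paths
-- ===== SOURCE B (Python) =====
-- def get_walks(start, neighbors, num_nodes):
--     """Iterative frontier expansion: grow all forward walks level by level,
--     then reverse each so it ends at start, exactly as the recursive version
--     builds them."""
--     partials = [[start]]
--     for _ in range(num_nodes):
--         partials = [w + [nb] for w in partials for nb in neighbors[w[-1]]]
--     return [w[::-1] for w in partials]
-- ===== Notes on version B (the rewrite author's own statement) =====
-- stated objective: simpler
-- what changed: Replaces the recursive depth-first enumeration (recursing per neighbor and appending start to each returned path) with an iterative breadth-first frontier: a list of forward partial walks rebuilt num_nodes times by one comprehension, each walk reversed at the end.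
-- outside the precondition, e.g. on get_walks(0, {0: []}, -1): A returns [], B returns [[0]]
import Mathlib
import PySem

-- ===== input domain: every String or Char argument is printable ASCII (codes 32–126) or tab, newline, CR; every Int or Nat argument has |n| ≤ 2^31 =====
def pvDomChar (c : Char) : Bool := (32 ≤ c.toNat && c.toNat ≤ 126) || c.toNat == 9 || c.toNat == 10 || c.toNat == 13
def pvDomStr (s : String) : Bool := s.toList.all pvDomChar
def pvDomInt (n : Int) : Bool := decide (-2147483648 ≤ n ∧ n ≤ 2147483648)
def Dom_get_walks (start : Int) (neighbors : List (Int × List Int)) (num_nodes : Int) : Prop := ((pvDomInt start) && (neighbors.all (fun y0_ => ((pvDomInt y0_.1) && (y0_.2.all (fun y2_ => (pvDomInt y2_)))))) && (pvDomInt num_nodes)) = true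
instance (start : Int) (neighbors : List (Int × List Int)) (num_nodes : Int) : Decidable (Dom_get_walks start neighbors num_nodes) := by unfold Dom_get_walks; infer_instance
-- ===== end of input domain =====

-- B replaces A's depth-first recursion by an iterative breadth-first frontier expansion
-- (same values on the stated precondition; return-value equivalence only).

-- dict lookup, first match (KeyError = none)
def pvLookup? (neighbors : List (Int × List Int)) (k : Int) : Option (List Int) :=
  (neighbors.find? (fun p => p.1 == k)).map (·.2)

-- ===== PORT A =====
-- A's recursion on num_nodes, with the (nonnegative, by Pre_) counter as fuel;
-- a missing key (Python KeyError, excluded by Pre_) yields [].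
def get_walks_fuel (neighbors : List (Int × List Int)) : Nat → Int → List (List Int)
  | 0, start => [[start]]
  | n+1, start =>
    match pvLookup? neighbors start with
    | none => []
    | some ns =>
      ns.foldl (fun paths neighbor =>
        (get_walks_fuel neighbors n neighbor).foldl
          (fun ps path => ps ++ [path ++ [start]]) paths) []

def get_walks (start : Int) (neighbors : List (Int × List Int)) (num_nodes : Int) : List (List Int) :=
  get_walks_fuel neighbors num_nodes.toNat start

-- ===== PORT B =====
-- Source B: partials = [[start]]; for _ in range(num_nodes): comprehension; reverse each.
-- w[-1] ported as getLastD 0 (every partial walk is nonempty); a missing key yields no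
-- extensions (Python raises KeyError there; excluded by Pre_).
def get_walks_alt (start : Int) (neighbors : List (Int × List Int)) (num_nodes : Int) : List (List Int) :=
  let partials := (PySem.List.pyRange 0 num_nodes 1).foldl
    (fun partials _ => partials.flatMap (fun w =>
      ((pvLookup? neighbors (w.getLastD 0)).getD []).map (fun nb => w ++ [nb])))
    [[start]]
  partials.map (fun w => w.reverse)

-- ===== PRECONDITION & SPEC =====
-- the set of nodes one step away from any node of cur
def pvFrontier (neighbors : List (Int × List Int)) (cur : List Int) : List Int :=
  PySem.Set.ofList (cur.flatMap (fun x => (pvLookup? neighbors x).getD []))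

-- every node within distance < n of the nodes in cur is a key of the dict
def pvReachOK (neighbors : List (Int × List Int)) : Nat → List Int → Bool
  | 0, _ => true
  | n+1, cur =>
      cur.all (fun x => (pvLookup? neighbors x).isSome) &&
      pvReachOK neighbors n (pvFrontier neighbors cur)

-- Pre_ excludes negative num_nodes (a walk length; A recurses without base case —
-- RecursionError/KeyError, or accidentally returns [] when neighbors[start] is empty)
-- and the inputs where A raises KeyError: some node within distance num_nodes-1 of
-- start is missing from the dict.
def Pre_get_walks (start : Int) (neighbors : List (Int × List Int)) (num_nodes : Int) : Prop :=
  0 ≤ num_nodes ∧ pvReachOK neighbors num_nodes.toNat [start] = true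
instance (start : Int) (neighbors : List (Int × List Int)) (num_nodes : Int) : Decidable (Pre_get_walks start neighbors num_nodes) := by unfold Pre_get_walks; infer_instance

def pvWitness_get_walks : Int × (List (Int × List Int)) × Int := (0, [(0, [1]), (1, [0, 1])], 2)

def Spec_get_walks (start : Int) (neighbors : List (Int × List Int)) (num_nodes : Int) (out : List (List Int)) : Prop := out = get_walks_alt start neighbors num_nodes
instance (start : Int) (neighbors : List (Int × List Int)) (num_nodes : Int) (out : List (List Int)) : Decidable (Spec_get_walks start neighbors num_nodes out) := by unfold Spec_get_walks; infer_instance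

-- ===== CLAIM (what is proved, stated in full; the proofs are below) =====
def Claim_equal_get_walks : Prop := ∀ (start : Int) (neighbors : List (Int × List Int)) (num_nodes : Int), Dom_get_walks start neighbors num_nodes → Pre_get_walks start neighbors num_nodes → Spec_get_walks start neighbors num_nodes (get_walks start neighbors num_nodes)

-- ===== LEMMAS AND PROOFS =====

-- one frontier-expansion step of B
def stepW (neighbors : List (Int × List Int)) (ps : List (List Int)) : List (List Int) :=
  ps.flatMap (fun w =>
    ((pvLookup? neighbors (w.getLastD 0)).getD []).map (fun nb => w ++ [nb]))

theorem foldl_const_iterate {α β : Type} (f : β → β) :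
    ∀ (l : List α) (init : β), l.foldl (fun b _ => f b) init = f^[l.length] init := by
  intro l
  induction l with
  | nil => intro init; rfl
  | cons a t ih =>
    intro init
    simp [List.foldl_cons, ih, Function.iterate_succ_apply]

theorem stepW_append (neighbors : List (Int × List Int)) (l1 l2 : List (List Int)) :
    stepW neighbors (l1 ++ l2) = stepW neighbors l1 ++ stepW neighbors l2 := by
  simp [stepW]

theorem stepW_iter_append (neighbors : List (Int × List Int)) :
    ∀ (n : Nat) (l1 l2 : List (List Int)),
      (stepW neighbors)^[n] (l1 ++ l2) = (stepW neighbors)^[n] l1 ++ (stepW neighbors)^[n] l2 := by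
  intro n
  induction n with
  | zero => intro l1 l2; rfl
  | succ n ih =>
    intro l1 l2
    simp only [Function.iterate_succ_apply, stepW_append, ih]

theorem stepW_iter_nil (neighbors : List (Int × List Int)) :
    ∀ (n : Nat), (stepW neighbors)^[n] ([] : List (List Int)) = [] := by
  intro n
  induction n with
  | zero => rfl
  | succ n ih => simp only [Function.iterate_succ_apply, stepW, List.flatMap_nil, ih]

theorem stepW_iter_map_singleton {α : Type} (neighbors : List (Int × List Int))
    (f : α → List Int) (n : Nat) :
    ∀ (l : List α),
      (stepW neighbors)^[n] (l.map f) = l.flatMap (fun x => (stepW neighbors)^[n] [f x]) := by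
  intro l
  induction l with
  | nil => simp [stepW_iter_nil]
  | cons a t ih =>
    have : (a :: t).map f = [f a] ++ t.map f := by simp
    rw [this, stepW_iter_append, ih]
    simp

theorem getLastD_append_of_ne_nil (pre w : List Int) (h : w ≠ []) :
    (pre ++ w).getLastD 0 = w.getLastD 0 := by
  cases w with
  | nil => exact absurd rfl h
  | cons a t =>
    obtain ⟨x, hx⟩ := Option.isSome_iff_exists.mp (by simp [List.getLast?_isSome] : (a :: t).getLast?.isSome = true)
    simp [List.getLastD_eq_getLast?, hx]

theorem stepW_map_prefix (neighbors : List (Int × List Int)) (pre : List Int)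
    (l : List (List Int)) (h : ∀ w ∈ l, w ≠ []) :
    stepW neighbors (l.map (fun w => pre ++ w)) = (stepW neighbors l).map (fun w => pre ++ w) := by
  simp only [stepW, List.flatMap_map, List.map_flatMap]
  apply List.flatMap_congr
  intro w hw
  rw [getLastD_append_of_ne_nil pre w (h w hw)]
  simp

theorem stepW_ne_nil (neighbors : List (Int × List Int)) (l : List (List Int)) :
    ∀ w ∈ stepW neighbors l, w ≠ [] := by
  intro w hw
  simp only [stepW, List.mem_flatMap, List.mem_map] at hw
  obtain ⟨v, _, nb, _, rfl⟩ := hw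
  simp

theorem stepW_iter_map_prefix (neighbors : List (Int × List Int)) (pre : List Int) :
    ∀ (n : Nat) (l : List (List Int)), (∀ w ∈ l, w ≠ []) →
      (stepW neighbors)^[n] (l.map (fun w => pre ++ w))
        = ((stepW neighbors)^[n] l).map (fun w => pre ++ w) := by
  intro n
  induction n with
  | zero => intro l _; rfl
  | succ n ih =>
    intro l h
    rw [Function.iterate_succ_apply, Function.iterate_succ_apply,
        stepW_map_prefix neighbors pre l h, ih _ (stepW_ne_nil neighbors l)]

theorem pvReachOK_mono (neighbors : List (Int × List Int)) :
    ∀ (n : Nat) (s s' : List Int), (∀ x ∈ s', x ∈ s) →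
      pvReachOK neighbors n s = true → pvReachOK neighbors n s' = true := by
  intro n
  induction n with
  | zero => intro s s' _ _; rfl
  | succ n ih =>
    intro s s' hsub h
    simp only [pvReachOK, Bool.and_eq_true, List.all_eq_true] at h ⊢
    refine ⟨fun x hx => h.1 x (hsub x hx), ih _ _ ?_ h.2⟩
    intro y hy
    simp only [pvFrontier, PySem.Set.mem_ofList, List.mem_flatMap] at hy ⊢
    obtain ⟨x, hx, hyx⟩ := hy
    exact ⟨x, hsub x hx, hyx⟩

-- main invariant: A's depth-first recursion equals n frontier steps, each walk reversed
theorem get_walks_fuel_eq (neighbors : List (Int × List Int)) :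
    ∀ (n : Nat) (start : Int), pvReachOK neighbors n [start] = true →
      get_walks_fuel neighbors n start
        = ((stepW neighbors)^[n] [[start]]).map List.reverse := by
  intro n
  induction n with
  | zero => intro start _; simp [get_walks_fuel]
  | succ n ih =>
    intro start hstart
    simp only [pvReachOK, Bool.and_eq_true, List.all_eq_true] at hstart
    obtain ⟨hall, hrest⟩ := hstart
    have hsome : (pvLookup? neighbors start).isSome = true := hall start (by simp)
    obtain ⟨ns, hns⟩ := Option.isSome_iff_exists.mp hsome
    have hkeys : ∀ nb ∈ ns, pvReachOK neighbors n [nb] = true := by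
      intro nb hnb
      refine pvReachOK_mono neighbors n _ [nb] ?_ hrest
      intro y hy
      simp only [List.mem_singleton] at hy
      subst hy
      simp only [pvFrontier, PySem.Set.mem_ofList, List.mem_flatMap]
      exact ⟨start, by simp, by simp [hns, hnb]⟩
    -- left side: unfold A's two nested loops into a flatMap of maps
    have lhs_eq : get_walks_fuel neighbors (n+1) start
        = ns.flatMap (fun nb => (get_walks_fuel neighbors n nb).map (fun p => p ++ [start])) := by
      simp only [get_walks_fuel, hns]
      rw [PySem.List.foldl_congr_mem
            (g := fun paths nb => paths ++ (get_walks_fuel neighbors n nb).map (fun p => p ++ [start]))]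
      · exact PySem.List.foldl_append_eq_flatMap _ _ _
      · intro acc x _
        exact PySem.List.foldl_append_singleton_eq_map _ _ _
    -- right side: one step from [[start]] then n more
    have step0 : stepW neighbors [[start]] = ns.map (fun nb => [start] ++ [nb]) := by
      simp [stepW, hns]
    rw [lhs_eq, Function.iterate_succ_apply, step0,
        stepW_iter_map_singleton neighbors (fun nb => [start] ++ [nb]) n ns,
        List.map_flatMap]
    apply List.flatMap_congr
    intro nb hnb
    rw [ih nb (hkeys nb hnb)]
    have hpre : (stepW neighbors)^[n] [[start] ++ [nb]]
        = ((stepW neighbors)^[n] [[nb]]).map (fun w => [start] ++ w) := by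
      have : ([[start] ++ [nb]] : List (List Int)) = [[nb]].map (fun w => [start] ++ w) := by simp
      rw [this, stepW_iter_map_prefix neighbors [start] n [[nb]] (by simp)]
    rw [hpre]
    simp [List.map_map, Function.comp_def]

-- B's port computes the iterated step
theorem get_walks_alt_eq (start : Int) (neighbors : List (Int × List Int)) (num_nodes : Int) :
    get_walks_alt start neighbors num_nodes
      = (((stepW neighbors)^[num_nodes.toNat]) [[start]]).map List.reverse := by
  unfold get_walks_alt
  rw [show (fun partials (_ : Int) => partials.flatMap (fun w =>
        ((pvLookup? neighbors (w.getLastD 0)).getD []).map (fun nb => w ++ [nb])))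
      = (fun partials _ => stepW neighbors partials) from rfl,
    foldl_const_iterate (stepW neighbors) (PySem.List.pyRange 0 num_nodes 1) [[start]],
    PySem.List.length_pyRange_one]
  norm_num

-- ===== VERDICT (by name: the statement is the Claim_ definition above) =====
theorem get_walks_spec : Claim_equal_get_walks := by
  intro start neighbors num_nodes _hdom hpre
  unfold Spec_get_walks
  obtain ⟨hn, hreach⟩ := hpre
  rw [get_walks_alt_eq]
  unfold get_walks
  exact get_walks_fuel_eq neighbors num_nodes.toNat start hreach
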